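-- pv_equiv track=rewrite | github.com/DaytimeBlues/math-omni-gamified | ui/premium_activity_view.py | _build_grouped_visual
-- ===== SOURCE A (Python) =====
-- def _build_grouped_visual(emoji: str, count: int) -> str:
--     """Build emoji display grouped in rows of 5 for easier counting."""
--     if count <= 5:
--         # Single row
--         return " ".join([emoji] * count)
--
--     # Multiple rows of 5
--     rows = []
--     remaining = count
--     while remaining > 0:
--         row_count = min(5, remaining)
--         rows.append(" ".join([emoji] * row_count))
--         remaining -= row_count
--
--     return "\n".join(rows)
-- ===== SOURCE B (Python) =====
-- def _build_grouped_visual(emoji: str, count: int) -> str: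
--     """Build emoji display grouped in rows of 5 for easier counting."""
--     if count <= 0:
--         return ""
--     q, r = divmod(count, 5)
--     rows = [" ".join([emoji] * 5)] * q
--     if r:
--         rows.append(" ".join([emoji] * r))
--     return "\n".join(rows)
-- ===== Notes on version B (the rewrite author's own statement) =====
-- stated objective: simpler
-- what changed: Replaces the decrementing while loop with divmod arithmetic: the full-row string is built once and list-repeated count//5 times, with one optional remainder row appended.
import Mathlib
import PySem

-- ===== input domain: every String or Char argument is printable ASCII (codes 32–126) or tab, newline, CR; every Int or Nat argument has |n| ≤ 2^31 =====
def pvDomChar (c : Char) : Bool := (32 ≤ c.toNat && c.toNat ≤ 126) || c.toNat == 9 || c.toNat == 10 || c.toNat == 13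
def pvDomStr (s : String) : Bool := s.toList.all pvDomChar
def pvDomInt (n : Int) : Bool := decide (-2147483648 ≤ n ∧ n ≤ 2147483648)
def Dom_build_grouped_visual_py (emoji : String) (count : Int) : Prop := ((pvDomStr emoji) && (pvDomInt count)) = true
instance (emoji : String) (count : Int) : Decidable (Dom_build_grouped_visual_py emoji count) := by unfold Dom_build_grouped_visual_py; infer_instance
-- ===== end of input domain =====

-- B replaces A's decrementing while loop by divmod arithmetic (full rows replicated, one remainder row); simpler decomposition, same result.

-- ===== PORT A =====
-- the while loop of A: appends rows of min(5, remaining) emojis until remaining ≤ 0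
def bgvLoop (emoji : String) (remaining : Int) (rows : List String) : List String :=
  if _h : remaining > 0 then
    let row_count := min 5 remaining
    bgvLoop emoji (remaining - row_count) (rows ++ [PySem.Str.join " " (PySem.List.pyRepeat [emoji] row_count)])
  else rows
termination_by remaining.toNat
decreasing_by omega

def build_grouped_visual_py (emoji : String) (count : Int) : String :=
  if count ≤ 5 then PySem.Str.join " " (PySem.List.pyRepeat [emoji] count)
  else PySem.Str.join "\n" (bgvLoop emoji count [])

-- ===== PORT B =====
def build_grouped_visual_py_alt (emoji : String) (count : Int) : String :=
  if count ≤ 0 then ""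
  else
    let q := PySem.Int.floordiv count 5
    let r := PySem.Int.mod count 5
    let rows := List.replicate q.toNat (PySem.Str.join " " (PySem.List.pyRepeat [emoji] 5))
    let rows := if r ≠ 0 then rows ++ [PySem.Str.join " " (PySem.List.pyRepeat [emoji] r)] else rows
    PySem.Str.join "\n" rows

-- ===== PRECONDITION & SPEC =====
def Spec_build_grouped_visual_py (emoji : String) (count : Int) (out : String) : Prop := out = build_grouped_visual_py_alt emoji count
instance (emoji : String) (count : Int) (out : String) : Decidable (Spec_build_grouped_visual_py emoji count out) := by unfold Spec_build_grouped_visual_py; infer_instance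

-- ===== CLAIM (what is proved, stated in full; the proofs are below) =====
def Claim_equal_build_grouped_visual_py : Prop := ∀ (emoji : String) (count : Int), Dom_build_grouped_visual_py emoji count → Spec_build_grouped_visual_py emoji count (build_grouped_visual_py emoji count)

-- ===== LEMMAS AND PROOFS =====

-- the loop produces (n/5) full rows followed by one remainder row when 5 ∤ n
theorem bgvLoop_eq (emoji : String) (m : Nat) :
    ∀ (n : Int), n.toNat ≤ m → 0 < n → ∀ (rows : List String),
    bgvLoop emoji n rows =
      rows ++ List.replicate (n / 5).toNat
                (PySem.Str.join " " (PySem.List.pyRepeat [emoji] 5)) ++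
        (if n % 5 ≠ 0 then
          [PySem.Str.join " " (PySem.List.pyRepeat [emoji] (n % 5))] else []) := by
  induction m with
  | zero => intro n hm hn; omega
  | succ m ih =>
    intro n hm hn rows
    rw [bgvLoop]
    simp only [hn, dif_pos]
    by_cases h5 : 5 ≤ n
    · have hmin : min 5 n = 5 := by omega
      rw [hmin]
      by_cases hz : n - 5 > 0
      · rw [ih (n - 5) (by omega) hz]
        have hq : ((n - 5) / 5).toNat + 1 = (n / 5).toNat := by omega
        have hr : (n - 5) % 5 = n % 5 := by omega
        rw [hr, ← hq, List.replicate_succ]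
        simp
      · have hn5 : n = 5 := by omega
        subst hn5
        rw [bgvLoop]
        norm_num
    · have hmin : min 5 n = n := by omega
      rw [hmin]
      rw [bgvLoop]
      have hz : ¬ (n - n > 0) := by omega
      simp only [hz, dite_false]
      have hq : (n / 5).toNat = 0 := by omega
      have hr : n % 5 = n := by omega
      rw [hq, hr, List.replicate_zero]
      have : n ≠ 0 := by omega
      simp [this]

theorem str_join_singleton (sep x : String) : PySem.Str.join sep [x] = x := by
  simp [PySem.Str.join]

theorem str_join_nil (sep : String) : PySem.Str.join sep [] = "" := by
  simp [PySem.Str.join]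

-- ===== VERDICT (by name: the statement is the Claim_ definition above) =====
theorem build_grouped_visual_py_spec : Claim_equal_build_grouped_visual_py := by
  intro emoji count _
  unfold Spec_build_grouped_visual_py build_grouped_visual_py build_grouped_visual_py_alt
  by_cases h0 : count ≤ 0
  · have h5 : count ≤ 5 := by omega
    have ht : count.toNat = 0 := by omega
    simp only [h5, if_pos, h0, PySem.List.pyRepeat_singleton, ht, List.replicate_zero,
      str_join_nil, if_pos]
  · have hd : PySem.Int.floordiv count 5 = count / 5 :=
      PySem.Int.floordiv_eq_ediv_of_pos (by omega)
    have hm : PySem.Int.mod count 5 = count % 5 :=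
      PySem.Int.mod_eq_emod_of_pos (by omega)
    by_cases h5 : count ≤ 5
    · simp only [h5, if_pos, h0, hd, hm]
      by_cases he : count = 5
      · subst he; norm_num [str_join_singleton]
      · have hq : (count / 5).toNat = 0 := by omega
        have hr : count % 5 = count := by omega
        have hnz : count ≠ 0 := by omega
        simp [hq, hr, hnz, str_join_singleton]
    · simp only [h5, h0, hd, hm, if_neg, not_false_iff]
      rw [bgvLoop_eq emoji count.toNat count (le_refl _) (by omega)]
      by_cases hdvd : (5:Int) ∣ count <;> simp [hdvd]
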